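-- pv_equiv track=rewrite | github.com/lucasfagan/Fake-Surfaces | fakesurfaces_cluster_cla_6.py | split_up_sequences_by_length_and_sort
-- ===== SOURCE A (Python) =====
-- def split_up_sequences_by_length_and_sort(sequences):
--     sequence_lengths = {}
--     sequences_sorted = {}
--     for sequence in sequences:
--         sequences_sorted[sequence] = [tuple(sorted((elt[0],elt[2]))) for elt in sequence]
--         if len(sequence) not in sequence_lengths.keys():
--             sequence_lengths[len(sequence)] = [sequence]
--         else:
--             sequence_lengths[len(sequence)].append(sequence)
--     return (sequence_lengths, sequences_sorted)
-- ===== SOURCE B (Python) =====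
-- def split_up_sequences_by_length_and_sort(sequences):
--     sequences_sorted = {s: [(min(e[0], e[2]), max(e[0], e[2])) for e in s]
--                         for s in sequences}
--     lengths = list(dict.fromkeys(len(s) for s in sequences))
--     sequence_lengths = {L: [s for s in sequences if len(s) == L] for L in lengths}
--     return (sequence_lengths, sequences_sorted)
-- ===== Notes on version B (the rewrite author's own statement) =====
-- stated objective: simpler
-- what changed: A's single loop that hash-buckets sequences by length while filling both dicts is replaced by two independent comprehensions: a dict comprehension mapping each sequence to its (min,max) pairs, and the first-occurrence-distinct lengths each mapped to a filter of the input list.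
import Mathlib
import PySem

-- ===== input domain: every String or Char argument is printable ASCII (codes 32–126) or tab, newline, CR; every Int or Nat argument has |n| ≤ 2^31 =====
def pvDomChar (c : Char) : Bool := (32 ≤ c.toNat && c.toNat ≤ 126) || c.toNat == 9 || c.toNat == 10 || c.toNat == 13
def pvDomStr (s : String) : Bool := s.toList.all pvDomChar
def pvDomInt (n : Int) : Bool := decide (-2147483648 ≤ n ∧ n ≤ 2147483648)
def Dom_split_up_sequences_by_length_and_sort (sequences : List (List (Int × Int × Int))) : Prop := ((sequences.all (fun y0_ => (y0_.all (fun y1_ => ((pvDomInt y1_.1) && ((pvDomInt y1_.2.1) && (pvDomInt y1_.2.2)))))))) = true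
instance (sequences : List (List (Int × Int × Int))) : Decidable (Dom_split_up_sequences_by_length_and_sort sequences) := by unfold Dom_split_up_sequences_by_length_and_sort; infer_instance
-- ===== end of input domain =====

-- B replaces A's single hash-bucketing loop by two independent comprehensions
-- (min/max pairs per sequence; first-occurrence-distinct lengths, each mapped to a
-- filter of the input); objective: simpler, same asymptotic behaviour in practice.

-- ===== PORT A =====
-- tuple(sorted((elt[0], elt[2]))) of A, step for step via Python's sorted
def pvSortPairA (e : Int × Int × Int) : Int × Int :=
  match PySem.List.sorted [e.1, e.2.2] (fun x => x) false with
  | [a, b] => (a, b)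
  | _ => (0, 0)   -- unreachable: sorting a two-element list yields two elements

def split_up_sequences_by_length_and_sort (sequences : List (List (Int × Int × Int))) : (List (Int × List (List (Int × Int × Int)))) × (List (List (Int × Int × Int) × List (Int × Int))) :=
  let st := sequences.foldl
    (fun (st : PySem.Dict Int (List (List (Int × Int × Int))) × PySem.Dict (List (Int × Int × Int)) (List (Int × Int))) sequence =>
      let ds := st.2.insert sequence (sequence.map pvSortPairA)
      let dl := if st.1.contains ((sequence.length : Int)) then
          st.1.insert ((sequence.length : Int)) (st.1.getD ((sequence.length : Int)) [] ++ [sequence])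
        else
          st.1.insert ((sequence.length : Int)) [sequence]
      (dl, ds))
    (PySem.Dict.empty, PySem.Dict.empty)
  (st.1.items, st.2.items)

-- ===== PORT B =====
-- (min(e[0], e[2]), max(e[0], e[2])) of B
def pvSortPairB (e : Int × Int × Int) : Int × Int := (min e.1 e.2.2, max e.1 e.2.2)

def split_up_sequences_by_length_and_sort_alt (sequences : List (List (Int × Int × Int))) : (List (Int × List (List (Int × Int × Int)))) × (List (List (Int × Int × Int) × List (Int × Int))) :=
  let sequences_sorted : PySem.Dict (List (Int × Int × Int)) (List (Int × Int)) :=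
    sequences.foldl (fun d s => d.insert s (s.map pvSortPairB)) PySem.Dict.empty
  let lengths := PySem.List.dedup (sequences.map (fun s => ((s.length : Int))))
  let sequence_lengths : PySem.Dict Int (List (List (Int × Int × Int))) :=
    lengths.foldl (fun d L => d.insert L (sequences.filter (fun s => ((s.length : Int)) == L))) PySem.Dict.empty
  (sequence_lengths.items, sequences_sorted.items)

-- ===== PRECONDITION & SPEC =====
def Spec_split_up_sequences_by_length_and_sort (sequences : List (List (Int × Int × Int))) (out : (List (Int × List (List (Int × Int × Int)))) × (List (List (Int × Int × Int) × List (Int × Int)))) : Prop := out = split_up_sequences_by_length_and_sort_alt sequences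
instance (sequences : List (List (Int × Int × Int))) (out : (List (Int × List (List (Int × Int × Int)))) × (List (List (Int × Int × Int) × List (Int × Int)))) : Decidable (Spec_split_up_sequences_by_length_and_sort sequences out) := by
  unfold Spec_split_up_sequences_by_length_and_sort
  -- instance search alone exceeds its size limit on this deeply nested type; assemble it
  have d3 : DecidableEq (List (List (Int × Int × Int))) := inferInstance
  have dA : DecidableEq (List (Int × List (List (Int × Int × Int)))) :=
    @instDecidableEqList _ (@instDecidableEqProd _ _ inferInstance d3)
  have dB : DecidableEq (List (List (Int × Int × Int) × List (Int × Int))) := inferInstance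
  exact @instDecidableEqProd _ _ dA dB _ _

-- ===== CLAIM (what is proved, stated in full; the proofs are below) =====
def Claim_equal_split_up_sequences_by_length_and_sort : Prop := ∀ (sequences : List (List (Int × Int × Int))), Dom_split_up_sequences_by_length_and_sort sequences → Spec_split_up_sequences_by_length_and_sort sequences (split_up_sequences_by_length_and_sort sequences)

-- ===== LEMMAS AND PROOFS =====

-- tuple(sorted((a, c))) is (min(a, c), max(a, c))
theorem pvSortPair_eq : pvSortPairA = pvSortPairB := by
  funext e
  rcases e with ⟨a, b, c⟩
  simp only [pvSortPairA, pvSortPairB, PySem.List.sorted_eq_foldl_insertBy, List.foldl,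
    PySem.List.insertBy]
  rcases le_total a c with h | h
  · rw [if_neg (by simp [not_lt.mpr h])]
    simp [min_eq_left h, max_eq_right h]
  · rcases eq_or_lt_of_le h with rfl | h'
    · simp
    · rw [if_pos (by simp [h'])]
      simp [min_eq_right h, max_eq_left h]

-- A's paired fold splits into two independent folds
theorem pv_foldl_pair {α β γ : Type} (f : α → γ → α) (g : β → γ → β)
    (l : List γ) (a : α) (b : β) :
    l.foldl (fun p x => (f p.1 x, g p.2 x)) (a, b) = (l.foldl f a, l.foldl g b) := by
  induction l generalizing a b with
  | nil => rfl
  | cons x xs ih => simp only [List.foldl_cons, ih]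

-- A's if/insert update on the lengths dict is exactly Dict.modify
theorem pv_step_eq_modify (d : PySem.Dict Int (List (List (Int × Int × Int))))
    (s : List (Int × Int × Int)) :
    (if d.contains ((s.length : Int)) then
        d.insert ((s.length : Int)) (d.getD ((s.length : Int)) [] ++ [s])
      else d.insert ((s.length : Int)) [s])
      = d.modify ((s.length : Int)) [] (· ++ [s]) := by
  by_cases h : d.contains ((s.length : Int)) = true
  · simp [h, PySem.Dict.modify]
  · simp only [Bool.not_eq_true] at h
    simp [h, PySem.Dict.modify, PySem.Dict.getD_of_not_contains _ _ h]

-- the lengths dict A builds, characterised: distinct lengths in first-occurrence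
-- order, each with the subsequence of inputs of that length
theorem pv_lengths_items (sequences : List (List (Int × Int × Int))) :
    (sequences.foldl
        (fun (d : PySem.Dict Int (List (List (Int × Int × Int)))) s =>
          d.modify ((s.length : Int)) [] (· ++ [s])) PySem.Dict.empty).items
      = (PySem.Set.ofList (sequences.map (fun s => ((s.length : Int))))).map
          (fun L => (L, sequences.filter (fun s => ((s.length : Int)) == L))) := by
  have hfold : sequences.foldl
      (fun (d : PySem.Dict Int (List (List (Int × Int × Int)))) s =>
        d.modify ((s.length : Int)) [] (· ++ [s])) PySem.Dict.empty
      = (sequences.map (fun s => (((s.length : Int)), s))).foldl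
          (fun d p => d.modify p.1 [] (· ++ [p.2])) PySem.Dict.empty := by
    rw [List.foldl_map]
  have hnd : (sequences.foldl
      (fun (d : PySem.Dict Int (List (List (Int × Int × Int)))) s =>
        d.modify ((s.length : Int)) [] (· ++ [s])) PySem.Dict.empty).keys.Nodup :=
    PySem.Dict.nodup_keys_foldl_modify_key sequences (fun s => ((s.length : Int))) []
      (fun _ s v => v ++ [s]) PySem.Dict.empty (by simp)
  rw [PySem.Dict.items_eq_map_keys _ hnd []]
  rw [PySem.Dict.keys_foldl_modify_key sequences (fun s => ((s.length : Int))) []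
    (fun _ s v => v ++ [s]) PySem.Dict.empty]
  apply List.map_congr_left
  intro L _
  rw [hfold, PySem.Dict.getD_foldl_modify_append]
  simp [List.filter_map, Function.comp_def]

theorem split_up_sequences_by_length_and_sort_spec : Claim_equal_split_up_sequences_by_length_and_sort := by
  intro sequences _
  unfold Spec_split_up_sequences_by_length_and_sort
  unfold split_up_sequences_by_length_and_sort split_up_sequences_by_length_and_sort_alt
  simp only [pvSortPair_eq]
  rw [pv_foldl_pair
      (fun (d : PySem.Dict Int (List (List (Int × Int × Int)))) sequence =>
        if d.contains ((sequence.length : Int)) then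
          d.insert ((sequence.length : Int)) (d.getD ((sequence.length : Int)) [] ++ [sequence])
        else d.insert ((sequence.length : Int)) [sequence])
      (fun (d : PySem.Dict (List (Int × Int × Int)) (List (Int × Int))) sequence =>
        d.insert sequence (sequence.map pvSortPairB))]
  refine Prod.ext ?_ rfl
  rw [funext fun d => funext fun s => pv_step_eq_modify d s]
  rw [pv_lengths_items, PySem.List.dedup_eq_ofList]
  rw [PySem.Dict.items_foldl_insert_fresh _ (fun L => L)
      (fun L => sequences.filter (fun s => ((s.length : Int)) == L)) PySem.Dict.empty
      (fun a _ => PySem.Dict.contains_empty a) (by simp [PySem.Set.nodup_ofList])]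
  simp [PySem.Dict.empty]
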